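-- pv_equiv track=rewrite | github.com/josdaver3000/pruebas_mlp | actualizacion/analizador.py | contar_loops
-- ===== SOURCE A (Python) =====
-- def contar_loops(codigo):
--     """Cuenta loops for y while en el código"""
--     count = 0
--     lineas = codigo.split('\n')
--     for linea in lineas:
--         linea_limpia = linea.strip()
--         if linea_limpia.startswith('for ') or linea_limpia.startswith('while '):
--             count += 1
--     return count
-- ===== SOURCE B (Python) =====
-- def contar_loops(codigo):
--     """Cuenta loops for y while en el codigo (single-pass state machine, no line list)."""
--     # states: 'lead' = skipping leading whitespace, 'match' = matching the rest of a
--     # keyword, 'seek' = keyword+space seen, need a non-space char before the line ends,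
--     # 'dead' = this line can no longer count
--     count = 0
--     state = 'lead'
--     rest = ''
--     for ch in codigo:
--         if ch == '\n':
--             state = 'lead'
--         elif state == 'lead':
--             if ch.isspace():
--                 pass
--             elif ch == 'f':
--                 state, rest = 'match', 'or '
--             elif ch == 'w':
--                 state, rest = 'match', 'hile '
--             else:
--                 state = 'dead'
--         elif state == 'match':
--             if ch == rest[0]:
--                 rest = rest[1:]
--                 if not rest:
--                     state = 'seek'
--             else:
--                 state = 'dead'
--         elif state == 'seek':
--             if not ch.isspace():
--                 count += 1
--                 state = 'dead'
--     return count
-- ===== Notes on version B (the rewrite author's own statement) =====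
-- stated objective: alternative
-- what changed: Replaces the line-list construction (split into lines, then per-line strip/startswith) with a single character-level finite state machine over the whole string that never builds a line list or stripped copies.
import Mathlib
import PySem

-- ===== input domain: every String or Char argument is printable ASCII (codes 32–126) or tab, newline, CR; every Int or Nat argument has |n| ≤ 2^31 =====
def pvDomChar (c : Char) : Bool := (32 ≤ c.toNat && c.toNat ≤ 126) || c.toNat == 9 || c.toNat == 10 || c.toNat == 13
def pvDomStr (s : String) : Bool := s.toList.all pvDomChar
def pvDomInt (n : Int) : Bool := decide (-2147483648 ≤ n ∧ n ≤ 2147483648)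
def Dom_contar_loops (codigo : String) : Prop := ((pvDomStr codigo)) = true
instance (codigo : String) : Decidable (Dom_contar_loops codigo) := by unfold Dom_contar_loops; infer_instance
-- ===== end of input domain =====

-- B replaces A's split('\n') + per-line strip/startswith scan by a single character-level
-- finite state machine over the whole string (objective: alternative; same O(n) cost).

-- ===== PORT A =====
def contar_loops (codigo : String) : Int :=
  -- count = 0; lineas = codigo.split('\n'); for linea in lineas: ...
  (PySem.Chars.splitOn codigo.toList ['\n']).foldl
    (fun count linea =>
      let linea_limpia := PySem.Chars.strip linea
      if PySem.Chars.startswith linea_limpia "for ".toList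
          || PySem.Chars.startswith linea_limpia "while ".toList then
        count + 1
      else count)
    0

-- ===== PORT B =====
-- per-line DFA states of Source B: 'lead' / 'match' (with the keyword rest) / 'seek' / 'dead'
inductive LoopSt where
  | lead
  | matching : List Char → LoopSt
  | seek
  | dead
deriving Repr, DecidableEq

def loopStep (st : Int × LoopSt) (ch : Char) : Int × LoopSt :=
  if ch = '\n' then (st.1, LoopSt.lead)
  else
    match st.2 with
    | LoopSt.lead =>
        if PySem.Chars.isspace ch then st
        else if ch = 'f' then (st.1, LoopSt.matching ['o', 'r', ' '])
        else if ch = 'w' then (st.1, LoopSt.matching ['h', 'i', 'l', 'e', ' '])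
        else (st.1, LoopSt.dead)
    | LoopSt.matching rest =>
        match rest with
        | [] => (st.1, LoopSt.dead)   -- unreachable (Source B never stores an empty rest)
        | r :: rs =>
            if ch = r then (st.1, if rs.isEmpty then LoopSt.seek else LoopSt.matching rs)
            else (st.1, LoopSt.dead)
    | LoopSt.seek =>
        if PySem.Chars.isspace ch then st else (st.1 + 1, LoopSt.dead)
    | LoopSt.dead => st

def contar_loops_alt (codigo : String) : Int :=
  (codigo.toList.foldl loopStep (0, LoopSt.lead)).1

-- ===== PRECONDITION & SPEC =====
def Spec_contar_loops (codigo : String) (out : Int) : Prop := out = contar_loops_alt codigo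
instance (codigo : String) (out : Int) : Decidable (Spec_contar_loops codigo out) := by unfold Spec_contar_loops; infer_instance

-- ===== CLAIM (what is proved, stated in full; the proofs are below) =====
def Claim_equal_contar_loops : Prop := ∀ (codigo : String), Dom_contar_loops codigo → Spec_contar_loops codigo (contar_loops codigo)

-- ===== LEMMAS AND PROOFS =====

def nonws (c : Char) : Bool := !PySem.Chars.isspace c

-- A's per-line contribution
def hitVal (l : List Char) : Int :=
  if PySem.Chars.startswith (PySem.Chars.strip l) "for ".toList
      || PySem.Chars.startswith (PySem.Chars.strip l) "while ".toList then 1 else 0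

-- simple recursive characterisation of split('\n')
def mySplit : List Char → List Char → List (List Char)
  | cur, [] => [cur]
  | cur, a :: t => if a = '\n' then cur :: mySplit [] t else mySplit (cur ++ [a]) t

theorem go_spec (fuel : Nat) : ∀ (l cur : List Char) (acc : List (List Char)),
    l.length < fuel →
    PySem.Chars.splitOn.go ['\n'] fuel l cur acc = acc.reverse ++ mySplit cur.reverse l := by
  induction fuel with
  | zero => intro l cur acc h; exact absurd h (Nat.not_lt_zero _)
  | succ f ih =>
      intro l cur acc h
      cases l with
      | nil =>
          rw [PySem.Chars.splitOn.go]
          simp [mySplit]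
          exact fun hc => Nat.succ_ne_zero f hc
      | cons a t =>
          rw [PySem.Chars.splitOn.go]
          by_cases ha : a = '\n'
          · subst ha
            simp only [List.isPrefixOf, BEq.rfl, Bool.true_and, List.isPrefixOf_nil_left, if_pos]
            rw [ih]
            · simp [mySplit]
            · simpa using Nat.lt_of_succ_lt_succ h
          · have : List.isPrefixOf ['\n'] (a :: t) = false := by
              simp [List.isPrefixOf]; exact fun hc => absurd hc.symm ha
            rw [this]
            simp only [Bool.false_eq_true, if_false]
            rw [ih]
            · simp [mySplit, ha]
            · simpa using Nat.lt_of_succ_lt_succ h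

theorem splitOn_eq (s : List Char) : PySem.Chars.splitOn s ['\n'] = mySplit [] s := by
  unfold PySem.Chars.splitOn
  rw [go_spec (s.length + 1) s [] [] (by omega)]
  simp

theorem foldl_count (ls : List (List Char)) (c : Int) :
    ls.foldl
      (fun count linea =>
        let linea_limpia := PySem.Chars.strip linea
        if PySem.Chars.startswith linea_limpia "for ".toList
            || PySem.Chars.startswith linea_limpia "while ".toList then
          count + 1
        else count) c
    = c + (ls.map hitVal).sum := by
  induction ls generalizing c with
  | nil => simp
  | cons l t ih =>
      simp only [List.foldl_cons, List.map_cons, List.sum_cons, ih, hitVal]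
      split <;> ring

-- ---- per-line runs of the state machine ----

theorem dead_run (l : List Char) (c : Int) (h : '\n' ∉ l) :
    (l.foldl loopStep (c, LoopSt.dead)).1 = c := by
  induction l with
  | nil => rfl
  | cons a t ih =>
      have ha : a ≠ '\n' := fun hc => h (hc ▸ List.mem_cons_self)
      simp only [List.foldl_cons, loopStep, if_neg ha]
      exact ih (fun hm => h (List.mem_cons_of_mem _ hm))

theorem seek_run (l : List Char) (c : Int) (h : '\n' ∉ l) :
    (l.foldl loopStep (c, LoopSt.seek)).1 = c + (if l.any nonws then 1 else 0) := by
  induction l generalizing c with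
  | nil => simp
  | cons a t ih =>
      have ha : a ≠ '\n' := fun hc => h (hc ▸ List.mem_cons_self)
      have ht : '\n' ∉ t := fun hm => h (List.mem_cons_of_mem _ hm)
      by_cases hs : PySem.Chars.isspace a = true
      · simp only [List.foldl_cons, loopStep, if_neg ha, hs, if_pos]
        rw [ih c ht]
        simp [List.any_cons, nonws, hs]
      · simp only [List.foldl_cons, loopStep, if_neg ha, hs, Bool.false_eq_true, if_false]
        rw [dead_run t (c + 1) ht]
        have hs' : PySem.Chars.isspace a = false := by simpa using hs
        simp [List.any_cons, nonws, hs']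

theorem match_run (l : List Char) : ∀ (r : Char) (rs : List Char) (c : Int), '\n' ∉ l →
    (l.foldl loopStep (c, LoopSt.matching (r :: rs))).1
      = c + (if (r :: rs).isPrefixOf l && (l.drop (rs.length + 1)).any nonws then 1 else 0) := by
  induction l with
  | nil => intro r rs c _; simp [List.isPrefixOf]
  | cons a t ih =>
      intro r rs c h
      have ha : a ≠ '\n' := fun hc => h (hc ▸ List.mem_cons_self)
      have ht : '\n' ∉ t := fun hm => h (List.mem_cons_of_mem _ hm)
      by_cases har : a = r
      · subst har
        cases rs with
        | nil =>
            simp only [List.foldl_cons, loopStep, if_neg ha, eq_self_iff_true, if_true,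
              List.isEmpty_nil]
            rw [seek_run t c ht]
            simp [List.isPrefixOf]
        | cons r2 rs2 =>
            simp only [List.foldl_cons, loopStep, if_neg ha, eq_self_iff_true, if_true,
              List.isEmpty_cons, Bool.false_eq_true, if_false]
            rw [ih r2 rs2 c ht]
            simp only [List.isPrefixOf, BEq.rfl, Bool.true_and, List.length_cons,
              List.drop_succ_cons]
      · simp only [List.foldl_cons, loopStep, if_neg ha, if_neg har]
        rw [dead_run t c ht]
        have : List.isPrefixOf (r :: rs) (a :: t) = false := by
          simp [List.isPrefixOf]; exact fun hc => absurd hc.symm har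
        simp [this]

-- ---- strip / startswith characterisation ----

theorem rstrip_decomp (m : List Char) :
    m = PySem.Chars.rstrip m ++ (m.reverse.takeWhile PySem.Chars.isspace).reverse
      ∧ ∀ x ∈ (m.reverse.takeWhile PySem.Chars.isspace).reverse, PySem.Chars.isspace x = true := by
  constructor
  · have h2 := congrArg List.reverse (List.takeWhile_append_dropWhile
      (p := PySem.Chars.isspace) (l := m.reverse))
    simp only [List.reverse_append, List.reverse_reverse] at h2
    simp only [PySem.Chars.rstrip]
    exact h2.symm
  · intro x hx
    exact List.mem_takeWhile_imp (List.mem_reverse.mp hx)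

theorem rstrip_prefix (m : List Char) : PySem.Chars.rstrip m <+: m := by
  have := (rstrip_decomp m).1
  exact ⟨_, this.symm⟩

theorem rstrip_last_nonws (m q : List Char) (x : Char)
    (h : PySem.Chars.rstrip m = q ++ [x]) : PySem.Chars.isspace x = false := by
  have hne : m.reverse.dropWhile PySem.Chars.isspace ≠ [] := by
    intro hc
    have : PySem.Chars.rstrip m = [] := by simp [PySem.Chars.rstrip, hc]
    rw [h] at this; simp at this
  have hh := List.head_dropWhile_not PySem.Chars.isspace hne
  have hx : (m.reverse.dropWhile PySem.Chars.isspace).head hne = x := by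
    have : m.reverse.dropWhile PySem.Chars.isspace = (q ++ [x]).reverse := by
      have : (m.reverse.dropWhile PySem.Chars.isspace).reverse = q ++ [x] := h
      rw [← this, List.reverse_reverse]
    simp [this]
  rw [hx] at hh; exact hh

theorem prefix_rstrip_iff (q m : List Char) (x : Char)
    (hx : PySem.Chars.isspace x = true) :
    (q ++ [x]) <+: PySem.Chars.rstrip m
      ↔ (q ++ [x]) <+: m ∧ (m.drop (q.length + 1)).any nonws = true := by
  obtain ⟨hdec, hws⟩ := rstrip_decomp m
  set tail := (m.reverse.takeWhile PySem.Chars.isspace).reverse with htail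
  set R := PySem.Chars.rstrip m with hR
  constructor
  · intro hpre
    have hpm : (q ++ [x]) <+: m := hpre.trans (rstrip_prefix m)
    refine ⟨hpm, ?_⟩
    have hRne : R ≠ [] := by
      intro hc; rw [hc] at hpre; simp [List.prefix_nil] at hpre
    obtain ⟨q', x', hqx⟩ : ∃ q' x', R = q' ++ [x'] :=
      ⟨R.dropLast, R.getLast hRne, (List.dropLast_append_getLast hRne).symm⟩
    have hx' : PySem.Chars.isspace x' = false := rstrip_last_nonws m q' x' hqx
    have hne : q.length + 1 ≠ q'.length + 1 := by
      intro hc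
      have heq : q ++ [x] = R := hpre.eq_of_length (by rw [hqx]; simpa using hc)
      have h3 : q ++ [x] = q' ++ [x'] := heq.trans hqx
      have hx_eq : x = x' := by simpa using congrArg List.getLast? h3
      rw [← hx_eq, hx] at hx'; cases hx'
    have hlt : q.length + 1 ≤ q'.length := by
      have h1 := hpre.length_le
      rw [hqx] at h1; simp at h1; omega
    have hdropR : R.drop (q.length + 1) = q'.drop (q.length + 1) ++ [x'] := by
      rw [hqx, List.drop_append_of_le_length hlt]
    have hmem : x' ∈ m.drop (q.length + 1) := by
      have hmdrop : m.drop (q.length + 1) = R.drop (q.length + 1) ++ tail := by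
        conv_lhs => rw [hdec]
        exact List.drop_append_of_le_length (by simp [hqx]; omega)
      rw [hmdrop, hdropR]; simp
    exact List.any_eq_true.mpr ⟨x', hmem, by simp [nonws, hx']⟩
  · rintro ⟨hpm, hany⟩
    obtain ⟨x', hx'mem, hx'⟩ := List.any_eq_true.mp hany
    have hlen : q.length + 1 ≤ R.length := by
      by_contra hc
      push_neg at hc
      have hsub : m.drop (q.length + 1) ⊆ tail := by
        have h1 : m.drop R.length = tail := by
          conv_lhs => rw [hdec]
          simpa using List.drop_append_of_le_length (le_refl R.length)
        have h2 : m.drop (q.length + 1) = (m.drop R.length).drop (q.length + 1 - R.length) := by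
          rw [List.drop_drop]; congr 1; omega
        rw [h2, h1]; exact List.drop_subset _ _
      have := hws x' (hsub hx'mem)
      simp [nonws, this] at hx'
    exact List.prefix_of_prefix_length_le hpm (rstrip_prefix m) (by simpa using hlen)

-- strip of a line headed by a non-space char keeps the head
theorem lstrip_cons_nonws (a : Char) (t : List Char) (ha : PySem.Chars.isspace a = false) :
    PySem.Chars.lstrip (a :: t) = a :: t := by
  simp [PySem.Chars.lstrip, List.dropWhile_cons, ha]

theorem hitVal_cons_ws (a : Char) (t : List Char) (ha : PySem.Chars.isspace a = true) :
    hitVal (a :: t) = hitVal t := by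
  unfold hitVal
  have : PySem.Chars.strip (a :: t) = PySem.Chars.strip t := by
    simp [PySem.Chars.strip, PySem.Chars.lstrip, List.dropWhile_cons, ha]
  rw [this]

-- head of a nonempty prefix of rstrip (a :: t) with nonws a is a
theorem hitVal_cons_nonws (a : Char) (t : List Char) (ha : PySem.Chars.isspace a = false) :
    hitVal (a :: t) =
      if (a = 'f' ∧ ['o', 'r', ' '] <+: t ∧ (t.drop 3).any nonws = true)
          ∨ (a = 'w' ∧ ['h', 'i', 'l', 'e', ' '] <+: t ∧ (t.drop 5).any nonws = true)
        then 1 else 0 := by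
  unfold hitVal
  rw [show PySem.Chars.strip (a :: t) = PySem.Chars.rstrip (a :: t) by
    simp [PySem.Chars.strip, lstrip_cons_nonws a t ha]]
  simp only [Bool.or_eq_true]
  have hfor : PySem.Chars.startswith (PySem.Chars.rstrip (a :: t)) "for ".toList = true
      ↔ (a = 'f' ∧ ['o', 'r', ' '] <+: t ∧ (t.drop 3).any nonws = true) := by
    rw [show ("for ".toList) = (['f', 'o', 'r'] ++ [' ']) by rfl]
    rw [PySem.Chars.startswith_iff, prefix_rstrip_iff ['f', 'o', 'r'] (a :: t) ' ' (by decide)]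
    simp only [List.length_cons, List.length_nil]
    constructor
    · rintro ⟨hp, hany⟩
      obtain ⟨haf, hp'⟩ := List.cons_prefix_cons.mp hp
      exact ⟨haf.symm, hp', by simpa using hany⟩
    · rintro ⟨haf, hp, hany⟩
      exact ⟨List.cons_prefix_cons.mpr ⟨haf.symm, hp⟩, by simpa using hany⟩
  have hwhile : PySem.Chars.startswith (PySem.Chars.rstrip (a :: t)) "while ".toList = true
      ↔ (a = 'w' ∧ ['h', 'i', 'l', 'e', ' '] <+: t ∧ (t.drop 5).any nonws = true) := by
    rw [show ("while ".toList) = (['w', 'h', 'i', 'l', 'e'] ++ [' ']) by rfl]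
    rw [PySem.Chars.startswith_iff, prefix_rstrip_iff ['w', 'h', 'i', 'l', 'e'] (a :: t) ' ' (by decide)]
    simp only [List.length_cons, List.length_nil]
    constructor
    · rintro ⟨hp, hany⟩
      obtain ⟨haw, hp'⟩ := List.cons_prefix_cons.mp hp
      exact ⟨haw.symm, hp', by simpa using hany⟩
    · rintro ⟨haw, hp, hany⟩
      exact ⟨List.cons_prefix_cons.mpr ⟨haw.symm, hp⟩, by simpa using hany⟩
  by_cases hcond : (a = 'f' ∧ ['o', 'r', ' '] <+: t ∧ (t.drop 3).any nonws = true)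
      ∨ (a = 'w' ∧ ['h', 'i', 'l', 'e', ' '] <+: t ∧ (t.drop 5).any nonws = true)
  · rw [if_pos hcond]
    rcases hcond with hc | hc
    · rw [if_pos (Or.inl (hfor.mpr hc))]
    · rw [if_pos (Or.inr (hwhile.mpr hc))]
  · rw [if_neg hcond, if_neg]
    intro hor
    rcases hor with hc | hc
    · exact hcond (Or.inl (hfor.mp hc))
    · exact hcond (Or.inr (hwhile.mp hc))

theorem lead_run (l : List Char) (c : Int) (h : '\n' ∉ l) :
    (l.foldl loopStep (c, LoopSt.lead)).1 = c + hitVal l := by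
  induction l generalizing c with
  | nil =>
      have h0 : hitVal [] = 0 := by decide
      simp [h0]
  | cons a t ih =>
      have ha : a ≠ '\n' := fun hc => h (hc ▸ List.mem_cons_self)
      have ht : '\n' ∉ t := fun hm => h (List.mem_cons_of_mem _ hm)
      by_cases hs : PySem.Chars.isspace a = true
      · simp only [List.foldl_cons, loopStep, if_neg ha, hs, if_pos]
        rw [ih c ht, hitVal_cons_ws a t hs]
      · have hs' : PySem.Chars.isspace a = false := by simpa using hs
        rw [hitVal_cons_nonws a t hs']
        by_cases haf : a = 'f'
        · subst haf
          simp only [List.foldl_cons, loopStep, if_neg ha, hs, Bool.false_eq_true, if_false]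
          rw [if_pos trivial, match_run t 'o' ['r', ' '] c ht]
          simp only [List.length_cons, List.length_nil, Nat.reduceAdd]
          congr 1
          by_cases hc : ['o', 'r', ' '] <+: t ∧ (t.drop 3).any nonws = true
          · have hL : (['o', 'r', ' '].isPrefixOf t && (t.drop 3).any nonws) = true := by
              rw [Bool.and_eq_true, List.isPrefixOf_iff_prefix]; exact hc
            rw [if_pos (Or.inl ⟨trivial, hc.1, hc.2⟩), if_pos hL]
          · have hL : ¬ ((['o', 'r', ' '].isPrefixOf t && (t.drop 3).any nonws) = true) := by
              rw [Bool.and_eq_true, List.isPrefixOf_iff_prefix]; exact hc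
            have hR : ¬ (True ∧ ['o', 'r', ' '] <+: t ∧ (t.drop 3).any nonws = true ∨
                'f' = 'w' ∧ ['h', 'i', 'l', 'e', ' '] <+: t ∧ (t.drop 5).any nonws = true) := by
              rintro (⟨_, h1, h2⟩ | ⟨hw, _, _⟩)
              · exact hc ⟨h1, h2⟩
              · exact absurd hw (by decide)
            rw [if_neg hR, if_neg hL]
        · by_cases haw : a = 'w'
          · subst haw
            simp only [List.foldl_cons, loopStep, if_neg ha, hs, Bool.false_eq_true, if_false]
            rw [if_neg haf, if_pos trivial, match_run t 'h' ['i', 'l', 'e', ' '] c ht]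
            simp only [List.length_cons, List.length_nil, Nat.reduceAdd]
            congr 1
            by_cases hc : ['h', 'i', 'l', 'e', ' '] <+: t ∧ (t.drop 5).any nonws = true
            · have hL : (['h', 'i', 'l', 'e', ' '].isPrefixOf t && (t.drop 5).any nonws) = true := by
                rw [Bool.and_eq_true, List.isPrefixOf_iff_prefix]; exact hc
              rw [if_pos (Or.inr ⟨trivial, hc.1, hc.2⟩), if_pos hL]
            · have hL : ¬ ((['h', 'i', 'l', 'e', ' '].isPrefixOf t && (t.drop 5).any nonws) = true) := by
                rw [Bool.and_eq_true, List.isPrefixOf_iff_prefix]; exact hc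
              have hR : ¬ ('w' = 'f' ∧ ['o', 'r', ' '] <+: t ∧ (t.drop 3).any nonws = true ∨
                  True ∧ ['h', 'i', 'l', 'e', ' '] <+: t ∧ (t.drop 5).any nonws = true) := by
                rintro (⟨hw, _, _⟩ | ⟨_, h1, h2⟩)
                · exact absurd hw (by decide)
                · exact hc ⟨h1, h2⟩
              rw [if_neg hR, if_neg hL]
          · simp only [List.foldl_cons, loopStep, if_neg ha, hs, Bool.false_eq_true, if_false,
              if_neg haf, if_neg haw]
            rw [dead_run t c ht, if_neg]
            · ring
            · rintro (⟨hf, _, _⟩ | ⟨hw, _, _⟩)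
              · exact haf hf
              · exact haw hw

theorem scan_split (s : List Char) : ∀ (cur : List Char) (c : Int), '\n' ∉ cur →
    (s.foldl loopStep (cur.foldl loopStep (c, LoopSt.lead))).1
      = c + ((mySplit cur s).map hitVal).sum := by
  induction s with
  | nil =>
      intro cur c hcur
      simp only [List.foldl_nil, mySplit, List.map_cons, List.map_nil, List.sum_cons,
        List.sum_nil, add_zero]
      exact lead_run cur c hcur
  | cons a t ih =>
      intro cur c hcur
      by_cases ha : a = '\n'
      · subst ha
        have hstep : loopStep (cur.foldl loopStep (c, LoopSt.lead)) '\n'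
            = ((cur.foldl loopStep (c, LoopSt.lead)).1, LoopSt.lead) := by
          simp [loopStep]
        have h1 : (cur.foldl loopStep (c, LoopSt.lead)).1 = c + hitVal cur :=
          lead_run cur c hcur
        calc (List.foldl loopStep (cur.foldl loopStep (c, LoopSt.lead)) ('\n' :: t)).1
            = (t.foldl loopStep (c + hitVal cur, LoopSt.lead)).1 := by
              rw [List.foldl_cons, hstep, h1]
          _ = (t.foldl loopStep (List.foldl loopStep (c + hitVal cur, LoopSt.lead) [])).1 := rfl
          _ = (c + hitVal cur) + ((mySplit [] t).map hitVal).sum := ih [] (c + hitVal cur) (by simp)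
          _ = c + ((mySplit cur ('\n' :: t)).map hitVal).sum := by
              simp [mySplit]; ring
      · have hfold : loopStep (cur.foldl loopStep (c, LoopSt.lead)) a
            = (cur ++ [a]).foldl loopStep (c, LoopSt.lead) := by
          rw [List.foldl_append]; rfl
        have hcur' : '\n' ∉ cur ++ [a] := by
          intro hm
          rcases List.mem_append.mp hm with hm | hm
          · exact hcur hm
          · simp at hm; exact ha hm.symm
        calc (List.foldl loopStep (cur.foldl loopStep (c, LoopSt.lead)) (a :: t)).1
            = (t.foldl loopStep ((cur ++ [a]).foldl loopStep (c, LoopSt.lead))).1 := by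
              rw [List.foldl_cons, hfold]
          _ = c + ((mySplit (cur ++ [a]) t).map hitVal).sum := ih (cur ++ [a]) c hcur'
          _ = c + ((mySplit cur (a :: t)).map hitVal).sum := by rw [mySplit]; simp [ha]

-- ===== VERDICT (by name: the statement is the Claim_ definition above) =====
theorem contar_loops_spec : Claim_equal_contar_loops := by
  intro codigo _
  unfold Spec_contar_loops contar_loops contar_loops_alt
  rw [splitOn_eq, foldl_count]
  have := scan_split codigo.toList [] 0 (by simp)
  simpa using this.symm
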